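-- pv_equiv track=rewrite | github.com/byrzhm/algo-arena | problems/unfiled/lc_2218.py | maxValueOfCoins
-- ===== SOURCE A (Python) =====
-- from typing import List
-- from functools import cache
-- from itertools import accumulate
--
-- def maxValueOfCoins(piles: List[List[int]], k: int) -> int:
--     @cache  # 缓存装饰器，避免重复计算 dfs 的结果（记忆化）
--     def dfs(i: int, j: int) -> int:
--         if i < 0:
--             return 0
--         # 不选这一组中的任何物品
--         res = dfs(i - 1, j)
--         # 枚举选哪个
--         for w, v in enumerate(accumulate(piles[i][:j]), 1):
--             res = max(res, dfs(i - 1, j - w) + v)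
--         return res
--
--     return dfs(len(piles) - 1, k)
-- ===== SOURCE B (Python) =====
-- from typing import List
-- from itertools import accumulate
--
--
-- def maxValueOfCoins(piles: List[List[int]], k: int) -> int:
--     # Bottom-up group-knapsack tabulation: dp[j] = best value using at most j
--     # picks from the piles processed so far.  More than sum(len(pile)) picks
--     # can never help, so the budget is capped there.
--     kk = min(k, sum(len(pile) for pile in piles))
--     dp = [0] * (kk + 1)
--     for pile in piles:
--         prefix = list(accumulate(pile, initial=0))
--         dp = [max(dp[j - w] + prefix[w] for w in range(min(j, len(pile)) + 1))
--               for j in range(kk + 1)]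
--     return dp[kk]
-- ===== Notes on version B (the rewrite author's own statement) =====
-- stated objective: alternative
-- what changed: Replaced the memoized top-down recursion (dfs over pile index and budget) by an iterative bottom-up 1-D dp table over budgets (capped at the total coin count, which cannot change the optimum), folded pile by pile with per-pile prefix sums.
-- outside the precondition, e.g. on maxValueOfCoins([[5, 10], [3]], -1): A returns 5, B raises IndexError
import Mathlib
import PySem

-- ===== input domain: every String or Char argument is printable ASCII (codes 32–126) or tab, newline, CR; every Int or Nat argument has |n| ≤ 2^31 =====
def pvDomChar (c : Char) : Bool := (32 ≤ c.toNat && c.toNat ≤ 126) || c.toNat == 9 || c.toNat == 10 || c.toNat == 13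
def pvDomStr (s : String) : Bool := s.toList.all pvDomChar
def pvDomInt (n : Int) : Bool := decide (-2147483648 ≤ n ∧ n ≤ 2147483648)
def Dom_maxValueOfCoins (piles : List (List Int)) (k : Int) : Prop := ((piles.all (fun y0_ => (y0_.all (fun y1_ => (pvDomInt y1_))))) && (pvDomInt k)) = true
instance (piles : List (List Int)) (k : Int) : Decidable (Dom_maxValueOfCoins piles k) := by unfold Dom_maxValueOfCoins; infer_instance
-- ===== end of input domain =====

-- B replaces A's memoized top-down recursion by an iterative bottom-up 1-D dp over budgets
-- (equal return values proved for k ≥ 0; A's @cache only affects speed, not the value).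

-- ===== PORT A =====
-- accumulate(xs): running sums (itertools.accumulate)
def pyAccFrom (s : Int) : List Int → List Int
  | [] => []
  | x :: r => (s + x) :: pyAccFrom (s + x) r

-- the 'for w, v in enumerate(accumulate(piles[i][:j]), 1): res = max(res, dfs(i-1, j-w) + v)' loop
def innerA (f : Int → Int) (j : Int) : List Int → Int → Int → Int
  | [], _, res => res
  | v :: r, w, res => innerA f j r (w + 1) (max res (f (j - w) + v))

-- dfs(i, j) with n = i + 1; piles[i] is ported as getD (the index n is always in range at call sites)
def dfsA (piles : List (List Int)) : Nat → Int → Int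
  | 0, _ => 0
  | n + 1, j =>
    innerA (dfsA piles n) j
      (pyAccFrom 0 (PySem.List.slice (piles.getD n []) none (some j))) 1 (dfsA piles n j)

def maxValueOfCoins (piles : List (List Int)) (k : Int) : Int :=
  dfsA piles piles.length k

-- ===== PORT B =====
-- max() of a nonempty list (Python raises on []; B never calls it on [])
def pyMax (xs : List Int) : Int :=
  match xs with
  | [] => 0
  | h :: t => t.foldl max h

-- one pile of the fold: new dp from old dp via the pile's prefix sums
-- (Python lists are arrays: dp is ported as Array Int for O(1) indexing, as in Python)
def stepB (kn : Nat) (dp : Array Int) (pile : List Int) : Array Int :=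
  let pref := (List.scanl (· + ·) 0 pile).toArray
  (Array.range (kn + 1)).map (fun j =>
    pyMax ((List.range (min j pile.length + 1)).map
      (fun w => dp.getD (j - w) 0 + pref.getD w 0)))

def maxValueOfCoins_alt (piles : List (List Int)) (k : Int) : Int :=
  let kn := (min k ((piles.map List.length).sum : Int)).toNat
  (piles.foldl (stepB kn) (Array.replicate (kn + 1) 0)).getD kn 0

-- ===== PRECONDITION & SPEC =====
-- Pre_ excludes negative k: A still returns a value there (an artefact of Python's negative-slice
-- semantics in piles[i][:j]), but B's dp table [0]*(k+1) is empty, so dp[k] raises IndexError.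
def Pre_maxValueOfCoins (piles : List (List Int)) (k : Int) : Prop := 0 ≤ k
instance (piles : List (List Int)) (k : Int) : Decidable (Pre_maxValueOfCoins piles k) := by
  unfold Pre_maxValueOfCoins; infer_instance

def pvWitness_maxValueOfCoins : List (List Int) × Int := ([[1, 100, 3], [7, 8, 9]], 2)

def Spec_maxValueOfCoins (piles : List (List Int)) (k : Int) (out : Int) : Prop := out = maxValueOfCoins_alt piles k
instance (piles : List (List Int)) (k : Int) (out : Int) : Decidable (Spec_maxValueOfCoins piles k out) := by unfold Spec_maxValueOfCoins; infer_instance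

-- ===== CLAIM (what is proved, stated in full; the proofs are below) =====
def Claim_equal_maxValueOfCoins : Prop := ∀ (piles : List (List Int)) (k : Int), Dom_maxValueOfCoins piles k → Pre_maxValueOfCoins piles k → Spec_maxValueOfCoins piles k (maxValueOfCoins piles k)

-- ===== LEMMAS AND PROOFS =====

-- A's inner loop with the running sum carried explicitly
def loop2 (f : Int → Int) (j : Int) : Int → List Int → Int → Int → Int
  | _, [], _, res => res
  | s, x :: r, w, res => loop2 f j (s + x) r (w + 1) (max res (f (j - w) + (s + x)))

-- dfs re-expressed as recursion over the (reversed) list of processed piles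
def dfsR : List (List Int) → Int → Int
  | [], _ => 0
  | p :: rest, j =>
    innerA (dfsR rest) j (pyAccFrom 0 (PySem.List.slice p none (some j))) 1 (dfsR rest j)

-- list-level view of stepB, for the proofs
def stepL (kn : Nat) (dp : List Int) (pile : List Int) : List Int :=
  let pref := List.scanl (· + ·) 0 pile
  (List.range (kn + 1)).map (fun j =>
    pyMax ((List.range (min j pile.length + 1)).map
      (fun w => dp.getD (j - w) 0 + pref.getD w 0)))

lemma array_getD_toList {α : Type} (a : Array α) (i : Nat) (d : α) :
    a.getD i d = a.toList.getD i d := by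
  simp [Array.getD, List.getD]
  split <;> simp_all

lemma stepB_toList (kn : Nat) (dp : Array Int) (pile : List Int) :
    (stepB kn dp pile).toList = stepL kn dp.toList pile := by
  simp only [stepB, stepL, Array.toList_map, Array.toList_range]
  congr 1
  funext j
  congr 1
  apply List.map_congr_left
  intro w _
  rw [array_getD_toList, array_getD_toList]

lemma innerA_acc (f : Int → Int) (j : Int) :
    ∀ (xs : List Int) (s w res : Int),
      innerA f j (pyAccFrom s xs) w res = loop2 f j s xs w res := by
  intro xs
  induction xs with
  | nil => intro s w res; rfl
  | cons x r ih => intro s w res; simp [pyAccFrom, innerA, loop2, ih]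

lemma loop2_foldl (f : Int → Int) (j : Int) :
    ∀ (xs : List Int) (s w res : Int),
      loop2 f j s xs w res =
        (List.range xs.length).foldl
          (fun r (t : Nat) => max r (f (j - (w + (t : Int))) + (s + ((xs.take (t + 1)).sum)))) res := by
  intro xs
  induction xs with
  | nil => intro s w res; simp [loop2]
  | cons x r ih =>
    intro s w res
    rw [loop2, ih, List.length_cons, List.range_succ_eq_map, List.foldl_cons, List.foldl_map]
    congr 1
    · funext a t
      have h1 : j - (w + ((t : Int) + 1)) = j - ((w + 1) + (t : Int)) := by ring
      push_cast
      rw [h1, List.take_succ_cons, List.sum_cons]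
      ring_nf
    · push_cast
      simp

lemma scanl_getD (pile : List Int) :
    ∀ (w : Nat) (s : Int), w ≤ pile.length →
      (List.scanl (· + ·) s pile).getD w 0 = s + (pile.take w).sum := by
  induction pile with
  | nil =>
    intro w s hw
    have : w = 0 := by simpa using hw
    subst this; simp
  | cons x r ih =>
    intro w s hw
    cases w with
    | zero => simp
    | succ m =>
      rw [List.scanl_cons, List.getD_cons_succ, List.take_succ_cons, List.sum_cons,
        ih m (s + x) (by simpa using hw)]
      ring

lemma stepL_spec (kn : Nat) (dp pile : List Int) (f : Int → Int)
    (hdp : ∀ jn : Nat, jn ≤ kn → dp.getD jn 0 = f (jn : Int)) :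
    ∀ jn : Nat, jn ≤ kn →
      (stepL kn dp pile).getD jn 0 =
        innerA f (jn : Int) (pyAccFrom 0 (PySem.List.slice pile none (some (jn : Int)))) 1 (f (jn : Int)) := by
  intro jn hjn
  have hm : (pile.take jn).length = min jn pile.length := by simp
  set m := min jn pile.length with hmdef
  have hLHS : (stepL kn dp pile).getD jn 0 =
      pyMax ((List.range (m + 1)).map
        (fun w => dp.getD (jn - w) 0 + (List.scanl (· + ·) 0 pile).getD w 0)) := by
    have hlt : jn < kn + 1 := by omega
    simp [stepL, List.getD_eq_getElem?_getD, hlt]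
    rw [hmdef]
  rw [hLHS, PySem.List.slice_to_natCast, innerA_acc, loop2_foldl, hm]
  rw [List.range_succ_eq_map, List.map_cons, List.map_map]
  show List.foldl max _ _ = _
  rw [List.foldl_map]
  have hg0 : dp.getD (jn - 0) 0 + (List.scanl (· + ·) 0 pile).getD 0 0 = f (jn : Int) := by
    rw [Nat.sub_zero, hdp jn hjn, scanl_getD pile 0 0 (by omega)]
    simp
  rw [hg0]
  refine PySem.List.foldl_congr_mem _ _ _ _ ?_
  intro r t ht
  have htm : t < m := List.mem_range.mp ht
  have h1 : t + 1 ≤ jn := by omega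
  have h2 : t + 1 ≤ pile.length := by omega
  show max r (dp.getD (jn - (t + 1)) 0 + (List.scanl (· + ·) 0 pile).getD (t + 1) 0) =
      max r (f ((jn : Int) - (1 + (t : Int))) + (0 + (((pile.take jn).take (t + 1)).sum)))
  rw [hdp (jn - (t + 1)) (by omega), scanl_getD pile (t + 1) 0 h2, List.take_take]
  have hc : ((jn - (t + 1) : Nat) : Int) = (jn : Int) - (1 + (t : Int)) := by omega
  have hmin : min (t + 1) jn = t + 1 := by omega
  rw [hc, hmin]

lemma dfsA_eq_dfsR (piles : List (List Int)) :
    ∀ (n : Nat), n ≤ piles.length → ∀ (j : Int),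
      dfsA piles n j = dfsR ((piles.take n).reverse) j := by
  intro n
  induction n with
  | zero => intro _ j; rfl
  | succ m ih =>
    intro hm j
    have hlt : m < piles.length := by omega
    have htake : (piles.take (m + 1)).reverse = piles[m] :: (piles.take m).reverse := by
      rw [List.take_add_one, List.getElem?_eq_getElem hlt]
      simp
    have hget : piles.getD m [] = piles[m] := List.getD_eq_getElem piles [] hlt
    have hfun : dfsA piles m = dfsR ((piles.take m).reverse) := by
      funext j'; exact ih (by omega) j'
    rw [htake]
    show innerA (dfsA piles m) j _ 1 (dfsA piles m j) = _
    rw [hfun, hget]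
    rfl

lemma foldlB (kn : Nat) :
    ∀ (ps : List (List Int)), ∀ jn : Nat, jn ≤ kn →
      (ps.foldl (stepL kn) (List.replicate (kn + 1) 0)).getD jn 0 = dfsR ps.reverse (jn : Int) := by
  intro ps
  induction ps using List.reverseRecOn with
  | nil => intro jn hjn; simp [dfsR, List.getD_eq_getElem?_getD]
  | append_singleton ps p ih =>
    intro jn hjn
    rw [List.foldl_append, List.foldl_cons, List.foldl_nil, List.reverse_append]
    simp only [List.reverse_cons, List.reverse_nil, List.nil_append, List.singleton_append]
    rw [stepL_spec kn _ p (fun i => dfsR ps.reverse i) (fun j hj => ih j hj) jn hjn]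
    rfl

def sumLen (ps : List (List Int)) : Nat := (ps.map List.length).sum

lemma dfsR_sat :
    ∀ (ps : List (List Int)) (j j' : Int),
      (sumLen ps : Int) ≤ j → (sumLen ps : Int) ≤ j' → dfsR ps j = dfsR ps j' := by
  intro ps
  induction ps with
  | nil => intro j j' _ _; rfl
  | cons p rest ih =>
    intro j j' hj hj'
    have hsum : (sumLen (p :: rest) : Int) = (p.length : Int) + (sumLen rest : Int) := by
      simp [sumLen]
    have hslice : ∀ i : Int, (sumLen (p :: rest) : Int) ≤ i →
        PySem.List.slice p none (some i) = p := by
      intro i hi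
      have h0 : (0 : Int) ≤ i := by omega
      rw [PySem.List.slice_to p h0]
      exact List.take_of_length_le (by omega)
    show innerA (dfsR rest) j _ 1 (dfsR rest j) = innerA (dfsR rest) j' _ 1 (dfsR rest j')
    rw [hslice j hj, hslice j' hj', innerA_acc, innerA_acc, loop2_foldl, loop2_foldl]
    rw [ih j j' (by omega) (by omega)]
    refine PySem.List.foldl_congr_mem _ _ _ _ ?_
    intro r t ht
    have htm : t < p.length := List.mem_range.mp ht
    have : dfsR rest (j - (1 + (t : Int))) = dfsR rest (j' - (1 + (t : Int))) :=
      ih _ _ (by omega) (by omega)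
    rw [this]

lemma foldl_stepB_toList (kn : Nat) (ps : List (List Int)) (a : Array Int) :
    (ps.foldl (stepB kn) a).toList = ps.foldl (stepL kn) a.toList := by
  induction ps generalizing a with
  | nil => rfl
  | cons p r ih => rw [List.foldl_cons, List.foldl_cons, ih, stepB_toList]

-- ===== VERDICT (by name: the statement is the Claim_ definition above) =====
theorem maxValueOfCoins_spec : Claim_equal_maxValueOfCoins := by
  intro piles k _ hk
  unfold Spec_maxValueOfCoins maxValueOfCoins maxValueOfCoins_alt
  rw [dfsA_eq_dfsR piles piles.length le_rfl k, List.take_length]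
  rw [array_getD_toList, foldl_stepB_toList, Array.toList_replicate]
  set kn := (min k ((piles.map List.length).sum : Int)).toNat with hkn
  rw [foldlB kn piles kn le_rfl]
  have hL : (sumLen piles.reverse : Int) = ((piles.map List.length).sum : Int) := by
    simp [sumLen]
  have hmin : ((kn : Nat) : Int) = min k ((piles.map List.length).sum : Int) := by
    rw [hkn]
    exact Int.toNat_of_nonneg (le_min hk (Int.natCast_nonneg _))
  by_cases hle : k ≤ ((piles.map List.length).sum : Int)
  · have : ((kn : Nat) : Int) = k := by omega
    rw [this]
  · refine dfsR_sat piles.reverse k (kn : Int) (by omega) (by omega)
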